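-- pv_equiv track=rewrite | github.com/AlberchtCa/LowRollerRhodeIsland | GameFunctions.py | get_winning_hand
-- ===== SOURCE A (Python) =====
-- from typing import List
--
-- def get_winning_hand(hand1: List[str], hand2: List[str]) -> int:
--     rank1 = get_rank(hand1)
--     rank2 = get_rank(hand2)
--     if rank1 > rank2:
--         return 0
--     if rank2 > rank1:
--         return 2
--     if rank2 == rank1:
--         count1 = count_cards(hand1)
--         count2 = count_cards(hand2)
--         for i in range(13, -1, -1):
--             if count1[i] > count2[i]:
--                 return 0
--             if count1[i] < count2[i]:
--                 return 2
--         return 1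
--
-- def get_rank(hand: List[str]) -> int:
--     count = count_cards(hand)
--     if is_straight_flush(hand, count):
--         return 1
--     if is_triplet(count):
--         return 2
--     if is_straight(count):
--         return 3
--     if is_flush(hand):
--         return 4
--     if is_pair(count):
--         return 5
--
--     return 6
--
-- def count_cards(hand: List[str]) -> List[int]:
--     cards = ['A', '2', '3', '4', '5', '6', '7', '8', '9', 'T', 'J', 'Q', 'K', 'A']
--     count = [0, 0, 0, 0, 0, 0, 0, 0, 0, 0, 0, 0, 0, 0]
--     for i in range(3):
--         for j in range(14):
--             if hand[i][0] == cards[j]: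
--                 count[j] += 1
--     return count
--
-- def is_pair(count: List[int]) -> bool:
--     if 2 in count:
--         return True
--     return False
--
-- def is_flush(hand: List[str]) -> bool:
--     for i in range(2):
--         if hand[i][1] != hand[i+1][1]:
--             return False
--     return True
--
-- def is_straight(count: List[int]) -> bool:
--     for i in range(12):
--         if count[i] == count[i + 1] == count[i + 2] == 1:
--             return True
--     return False
--
-- def is_triplet(count: List[int]) -> bool:
--     if 3 in count:
--         return True
--     return False
--
-- def is_straight_flush(hand: List[str], count: List[int]) -> bool:
--     if is_flush(hand) and is_straight(count):
--         return True
--     return False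
-- ===== SOURCE B (Python) =====
-- from typing import List
--
-- # Value of a rank character: Ace is 0 (low); 2..K are 1..12; anything else is absent (-1).
-- VAL = {'A': 0, '2': 1, '3': 2, '4': 3, '5': 4, '6': 5, '7': 6,
--        '8': 7, '9': 8, 'T': 9, 'J': 10, 'Q': 11, 'K': 12}
--
--
-- def _vals(hand: List[str]) -> List[int]:
--     # ascending sorted list of the recognised card values among the first 3 cards
--     return sorted(v for v in (VAL.get(c[0], -1) for c in hand[:3]) if v >= 0)
--
--
-- def _straight(vals: List[int]) -> bool:
--     # three distinct consecutive values, or the Ace-high straight Q-K-A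
--     return len(vals) == 3 and (vals == [0, 11, 12]
--                                or (vals[0] + 1 == vals[1] and vals[1] + 1 == vals[2]))
--
--
-- def _rank(hand: List[str], vals: List[int]) -> int:
--     flush = hand[0][1] == hand[1][1] == hand[2][1]
--     straight = _straight(vals)
--     if flush and straight:
--         return 1
--     if len(vals) == 3 and vals[0] == vals[2]:
--         return 2
--     if straight:
--         return 3
--     if flush:
--         return 4
--     if any(vals.count(v) == 2 for v in vals):
--         return 5
--     return 6
--
--
-- def _tie(vals: List[int]) -> List[int]:
--     # card values high-to-low for the tie-break; an Ace counts both high (13) and low (0)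
--     return sorted((x for v in vals for x in ((13, 0) if v == 0 else (v,))), reverse=True)
--
--
-- def get_winning_hand(hand1: List[str], hand2: List[str]) -> int:
--     v1, v2 = _vals(hand1), _vals(hand2)
--     s1 = (_rank(hand1, v1), _tie(v1))
--     s2 = (_rank(hand2, v2), _tie(v2))
--     if s1 > s2:
--         return 0
--     if s2 > s1:
--         return 2
--     return 1
-- ===== Notes on version B (the rewrite author's own statement) =====
-- stated objective: alternative
-- what changed: B drops A's 14-slot count histogram entirely: each card maps to a numeric value via a dict, the hand class is read off the ascending sorted value list (all-equal / pair-count / consecutive-run patterns with an explicit Q-K-A ace-high case), and ties are broken by one lexicographic comparison of the descending expanded value lists (an Ace counted both high and low), instead of A's histogram-window scans and descending count-slot early-exit loop.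
import Mathlib
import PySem

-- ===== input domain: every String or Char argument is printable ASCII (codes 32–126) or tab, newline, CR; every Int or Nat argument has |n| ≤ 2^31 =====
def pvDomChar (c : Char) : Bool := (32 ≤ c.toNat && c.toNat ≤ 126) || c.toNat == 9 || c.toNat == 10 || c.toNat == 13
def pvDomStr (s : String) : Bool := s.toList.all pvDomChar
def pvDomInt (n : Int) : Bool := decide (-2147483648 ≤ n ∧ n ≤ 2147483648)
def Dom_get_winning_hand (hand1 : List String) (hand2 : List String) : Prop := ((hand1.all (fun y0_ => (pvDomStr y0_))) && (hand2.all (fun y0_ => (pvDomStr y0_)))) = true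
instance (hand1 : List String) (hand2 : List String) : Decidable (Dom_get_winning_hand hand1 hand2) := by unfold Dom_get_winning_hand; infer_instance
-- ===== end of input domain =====

-- B drops A's 14-slot histogram entirely: it classifies a hand from the sorted list of its
-- card values (explicit straight patterns, equal-value tests) and tie-breaks by the sorted
-- expanded card values (an Ace counted both high and low); objective: alternative, not faster.

-- ===== PORT A =====

-- hand[i][0] / hand[i][1]; Pre_ guarantees the indexed strings are long enough,
-- so the defaults are never consulted on admitted inputs
def pvFirst (s : String) : Char := s.toList.headD ' '
def pvSecond (s : String) : Char := (s.toList.drop 1).headD ' '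
def pvCards : List Char := ['A', '2', '3', '4', '5', '6', '7', '8', '9', 'T', 'J', 'Q', 'K', 'A']
def pvIncr (cnt : List Int) (j : Nat) : List Int := cnt.set j (cnt.getD j 0 + 1)

def count_cards (hand : List String) : List Int :=
  (List.range 3).foldl (fun cnt i =>
    (List.range 14).foldl (fun c j =>
      if pvFirst (hand.getD i "") == pvCards.getD j ' ' then pvIncr c j else c) cnt)
    [0, 0, 0, 0, 0, 0, 0, 0, 0, 0, 0, 0, 0, 0]

def is_pair (count : List Int) : Bool := count.contains 2

def is_flush (hand : List String) : Bool :=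
  (List.range 2).all fun i => pvSecond (hand.getD i "") == pvSecond (hand.getD (i + 1) "")

def is_straight (count : List Int) : Bool :=
  (List.range 12).any fun i =>
    (count.getD i 0 == count.getD (i + 1) 0) && (count.getD (i + 1) 0 == count.getD (i + 2) 0)
      && (count.getD (i + 2) 0 == 1)

def is_triplet (count : List Int) : Bool := count.contains 3

def is_straight_flush (hand : List String) (count : List Int) : Bool :=
  is_flush hand && is_straight count

def get_rank (hand : List String) : Int :=
  let count := count_cards hand
  if is_straight_flush hand count then 1
  else if is_triplet count then 2
  else if is_straight count then 3
  else if is_flush hand then 4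
  else if is_pair count then 5
  else 6

-- the `for i in range(13, -1, -1)` early-return loop
def pvTiebreak (c1 c2 : List Int) : List Nat → Int
  | [] => 1
  | i :: rest =>
      if c1.getD i 0 > c2.getD i 0 then 0
      else if c1.getD i 0 < c2.getD i 0 then 2
      else pvTiebreak c1 c2 rest

def get_winning_hand (hand1 : List String) (hand2 : List String) : Int :=
  let rank1 := get_rank hand1
  let rank2 := get_rank hand2
  if rank1 > rank2 then 0
  else if rank2 > rank1 then 2
  else if rank2 = rank1 then
    pvTiebreak (count_cards hand1) (count_cards hand2) ((List.range 14).reverse)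
  else 0  -- unreachable by trichotomy (Python would fall off the end)

-- ===== PORT B =====

-- the VAL dict of Source B (single-character keys, per the Char convention for 1-char strings)
def pvVAL : PySem.Dict Char Int := PySem.Dict.mk
  [('A', 0), ('2', 1), ('3', 2), ('4', 3), ('5', 4), ('6', 5), ('7', 6),
   ('8', 7), ('9', 8), ('T', 9), ('J', 10), ('Q', 11), ('K', 12)]

-- _vals: ascending sorted recognised card values among the first three cards
def pvVals (hand : List String) : List Int :=
  PySem.List.sorted
    (((PySem.List.slice hand none (some 3)).map
        (fun c => PySem.Dict.getD pvVAL (pvFirst c) (-1))).filter (fun v => decide (0 ≤ v)))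
    (fun v => v) false

-- _straight
def pvStraightB (vals : List Int) : Bool :=
  vals.length == 3 && (vals == [0, 11, 12]
    || ((PySem.List.pyGetD vals 0 0 + 1 == PySem.List.pyGetD vals 1 0)
        && (PySem.List.pyGetD vals 1 0 + 1 == PySem.List.pyGetD vals 2 0)))

-- _rank
def pvRankB (hand : List String) (vals : List Int) : Int :=
  let flush := (pvSecond (hand.getD 0 "") == pvSecond (hand.getD 1 ""))
      && (pvSecond (hand.getD 1 "") == pvSecond (hand.getD 2 ""))
  let straight := pvStraightB vals
  if flush && straight then 1
  else if vals.length == 3 && (PySem.List.pyGetD vals 0 0 == PySem.List.pyGetD vals 2 0) then 2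
  else if straight then 3
  else if flush then 4
  else if vals.any (fun v => PySem.List.count vals v == 2) then 5
  else 6

-- _tie
def pvTie (vals : List Int) : List Int :=
  PySem.List.sorted (vals.flatMap (fun v => if v == 0 then [13, 0] else [v])) (fun v => v) true

-- Python's `>` on two int lists (lexicographic, longer wins on an equal prefix)
def pyListGt : List Int → List Int → Bool
  | _ :: _, [] => true
  | [], _ => false
  | a :: as, b :: bs => if a > b then true else if a < b then false else pyListGt as bs

-- Python's `>` on the (int, list) score pairs
def pyPairGt (a b : Int × List Int) : Bool :=
  if a.1 > b.1 then true else if a.1 < b.1 then false else pyListGt a.2 b.2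

def get_winning_hand_alt (hand1 : List String) (hand2 : List String) : Int :=
  let v1 := pvVals hand1
  let v2 := pvVals hand2
  let s1 := (pvRankB hand1 v1, pvTie v1)
  let s2 := (pvRankB hand2 v2, pvTie v2)
  if pyPairGt s1 s2 then 0
  else if pyPairGt s2 s1 then 2
  else 1

-- ===== PRECONDITION & SPEC =====
-- Pre_ excludes exactly the inputs where Python A raises IndexError: each hand needs
-- at least 3 cards, the first two card strings at least 2 characters, the third at least 1;
-- the third needs a 2nd character only when the first two suit characters agree (is_flush
-- short-circuits before reading hand[2][1] otherwise).
def pvHandOk (h : List String) : Prop :=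
  3 ≤ h.length ∧ 2 ≤ (h.getD 0 "").toList.length ∧ 2 ≤ (h.getD 1 "").toList.length
    ∧ 1 ≤ (h.getD 2 "").toList.length
    ∧ (2 ≤ (h.getD 2 "").toList.length ∨ pvSecond (h.getD 0 "") ≠ pvSecond (h.getD 1 ""))

def Pre_get_winning_hand (hand1 : List String) (hand2 : List String) : Prop :=
  pvHandOk hand1 ∧ pvHandOk hand2

instance (hand1 : List String) (hand2 : List String) : Decidable (Pre_get_winning_hand hand1 hand2) := by
  unfold Pre_get_winning_hand pvHandOk; infer_instance

def pvWitness_get_winning_hand : List String × List String :=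
  (["As", "Ks", "Qs"], ["2h", "3d", "5c"])

def Spec_get_winning_hand (hand1 : List String) (hand2 : List String) (out : Int) : Prop := out = get_winning_hand_alt hand1 hand2
instance (hand1 : List String) (hand2 : List String) (out : Int) : Decidable (Spec_get_winning_hand hand1 hand2 out) := by unfold Spec_get_winning_hand; infer_instance

-- ===== CLAIM (what is proved, stated in full; the proofs are below) =====
def Claim_equal_get_winning_hand : Prop := ∀ (hand1 : List String) (hand2 : List String), Dom_get_winning_hand hand1 hand2 → Pre_get_winning_hand hand1 hand2 → Spec_get_winning_hand hand1 hand2 (get_winning_hand hand1 hand2)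

-- ===== LEMMAS AND PROOFS =====

-- abstract value of a rank character, and A's slot values in the 13-value scheme
def pvCharVal (c : Char) : Int := PySem.Dict.getD pvVAL c (-1)
def pvIdx13 (j : Nat) : Int := if j = 13 then 0 else (j : Int)
def pvInd (v : Int) (j : Nat) : Int := if v = pvIdx13 j then 1 else 0
def countsOf (v0 v1 v2 : Int) : List Int :=
  (List.range 14).map (fun j => pvInd v0 j + pvInd v1 j + pvInd v2 j)
def valsOf (v0 v1 v2 : Int) : List Int :=
  PySem.List.sorted ([v0, v1, v2].filter (fun v => decide (0 ≤ v))) (fun v => v) false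
-- run-length expansion of a count vector along a descending index list
def pvE' (idxs : List Nat) (cnt : List Int) : List Int :=
  idxs.flatMap (fun i => List.replicate (cnt.getD i 0).toNat (i : Int))
def pvE (cnt : List Int) : List Int := pvE' ((List.range 14).reverse) cnt
def pvVs : List Int := [-1, 0, 1, 2, 3, 4, 5, 6, 7, 8, 9, 10, 11, 12]
-- A's rank cascade / B's rank cascade with the flush test abstracted out
def pvRankA' (fl : Bool) (cnt : List Int) : Int :=
  if fl && is_straight cnt then 1 else if is_triplet cnt then 2 else if is_straight cnt then 3
  else if fl then 4 else if is_pair cnt then 5 else 6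
def pvRankB' (fl : Bool) (vals : List Int) : Int :=
  if fl && pvStraightB vals then 1
  else if vals.length == 3 && (PySem.List.pyGetD vals 0 0 == PySem.List.pyGetD vals 2 0) then 2
  else if pvStraightB vals then 3 else if fl then 4
  else if vals.any (fun v => PySem.List.count vals v == 2) then 5 else 6

theorem charVal_of_ne (c : Char) (h0 : c ≠ 'A') (h1 : c ≠ '2') (h2 : c ≠ '3') (h3 : c ≠ '4')
    (h4 : c ≠ '5') (h5 : c ≠ '6') (h6 : c ≠ '7') (h7 : c ≠ '8') (h8 : c ≠ '9') (h9 : c ≠ 'T')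
    (h10 : c ≠ 'J') (h11 : c ≠ 'Q') (h12 : c ≠ 'K') : pvCharVal c = -1 := by
  unfold pvCharVal pvVAL
  rw [PySem.Dict.getD_eq_get?_getD]
  simp only [PySem.Dict.get?_mk_cons]
  rw [if_neg (by simpa using fun e => h0 e.symm), if_neg (by simpa using fun e => h1 e.symm),
      if_neg (by simpa using fun e => h2 e.symm), if_neg (by simpa using fun e => h3 e.symm),
      if_neg (by simpa using fun e => h4 e.symm), if_neg (by simpa using fun e => h5 e.symm),
      if_neg (by simpa using fun e => h6 e.symm), if_neg (by simpa using fun e => h7 e.symm),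
      if_neg (by simpa using fun e => h8 e.symm), if_neg (by simpa using fun e => h9 e.symm),
      if_neg (by simpa using fun e => h10 e.symm), if_neg (by simpa using fun e => h11 e.symm),
      if_neg (by simpa using fun e => h12 e.symm)]
  rfl

theorem charVal_mem (c : Char) : pvCharVal c ∈ pvVs := by
  by_cases h0 : c = 'A'; · subst h0; decide
  by_cases h1 : c = '2'; · subst h1; decide
  by_cases h2 : c = '3'; · subst h2; decide
  by_cases h3 : c = '4'; · subst h3; decide
  by_cases h4 : c = '5'; · subst h4; decide
  by_cases h5 : c = '6'; · subst h5; decide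
  by_cases h6 : c = '7'; · subst h6; decide
  by_cases h7 : c = '8'; · subst h7; decide
  by_cases h8 : c = '9'; · subst h8; decide
  by_cases h9 : c = 'T'; · subst h9; decide
  by_cases h10 : c = 'J'; · subst h10; decide
  by_cases h11 : c = 'Q'; · subst h11; decide
  by_cases h12 : c = 'K'; · subst h12; decide
  rw [charVal_of_ne c h0 h1 h2 h3 h4 h5 h6 h7 h8 h9 h10 h11 h12]
  decide

set_option maxHeartbeats 1000000 in
theorem card_match (c : Char) (j : Nat) (hj : j < 14) :
    (c == pvCards.getD j ' ') = decide (pvCharVal c = pvIdx13 j) := by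
  by_cases h0 : c = 'A'; · subst h0; interval_cases j <;> decide
  by_cases h1 : c = '2'; · subst h1; interval_cases j <;> decide
  by_cases h2 : c = '3'; · subst h2; interval_cases j <;> decide
  by_cases h3 : c = '4'; · subst h3; interval_cases j <;> decide
  by_cases h4 : c = '5'; · subst h4; interval_cases j <;> decide
  by_cases h5 : c = '6'; · subst h5; interval_cases j <;> decide
  by_cases h6 : c = '7'; · subst h6; interval_cases j <;> decide
  by_cases h7 : c = '8'; · subst h7; interval_cases j <;> decide
  by_cases h8 : c = '9'; · subst h8; interval_cases j <;> decide
  by_cases h9 : c = 'T'; · subst h9; interval_cases j <;> decide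
  by_cases h10 : c = 'J'; · subst h10; interval_cases j <;> decide
  by_cases h11 : c = 'Q'; · subst h11; interval_cases j <;> decide
  by_cases h12 : c = 'K'; · subst h12; interval_cases j <;> decide
  rw [charVal_of_ne c h0 h1 h2 h3 h4 h5 h6 h7 h8 h9 h10 h11 h12]
  interval_cases j <;>
    simp [pvCards, pvIdx13, beq_eq_false_iff_ne, h0, h1, h2, h3, h4, h5, h6, h7, h8, h9, h10, h11, h12]

theorem fold_len (ch : Char) (js : List Nat) (cnt : List Int) :
    ((js.foldl (fun c j => if ch == pvCards.getD j ' ' then pvIncr c j else c) cnt)).length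
      = cnt.length := by
  induction js generalizing cnt with
  | nil => rfl
  | cons j rest ih =>
      rw [List.foldl_cons, ih]
      split <;> simp [pvIncr]

theorem fold_getD (ch : Char) (js : List Nat) (hnd : js.Nodup) (cnt : List Int) (k : Nat)
    (hk : k < cnt.length) :
    ((js.foldl (fun c j => if ch == pvCards.getD j ' ' then pvIncr c j else c) cnt)).getD k 0
      = cnt.getD k 0 + (if k ∈ js ∧ (ch == pvCards.getD k ' ') = true then 1 else 0) := by
  induction js generalizing cnt with
  | nil => simp
  | cons j rest ih =>
      rw [List.foldl_cons]
      have hlen : (if (ch == pvCards.getD j ' ') = true then pvIncr cnt j else cnt).length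
          = cnt.length := by
        split <;> simp [pvIncr]
      rw [ih hnd.of_cons _ (by omega)]
      have hjn : j ∉ rest := (List.nodup_cons.mp hnd).1
      have hstep : (if (ch == pvCards.getD j ' ') = true then pvIncr cnt j else cnt).getD k 0
          = cnt.getD k 0 + (if k = j ∧ (ch == pvCards.getD k ' ') = true then 1 else 0) := by
        by_cases hkj : k = j
        · subst hkj
          by_cases hm : (ch == pvCards.getD k ' ') = true
          · rw [if_pos hm, if_pos ⟨rfl, hm⟩, pvIncr,
                List.getD_eq_getElem _ _ (by simpa using hk), List.getElem_set_self,
                List.getD_eq_getElem _ _ hk]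
          · rw [if_neg hm, if_neg (fun hc => hm hc.2), add_zero]
        · by_cases hm : (ch == pvCards.getD j ' ') = true
          · rw [if_pos hm, if_neg (fun hc => hkj hc.1), add_zero, pvIncr,
                List.getD_eq_getElem _ _ (by simpa using hk),
                List.getElem_set_ne (h := fun h => hkj h.symm), List.getD_eq_getElem _ _ hk]
          · rw [if_neg hm, if_neg (fun hc => hkj hc.1), add_zero]
      rw [hstep]
      by_cases hm : ch = pvCards.getD k ' '
      · by_cases hkj : k = j
        · subst hkj
          simp [hm, hjn]
        · simp [hm, hkj]
      · rw [if_neg (fun hc => hm (eq_of_beq hc.2)), if_neg (fun hc => hm (eq_of_beq hc.2)),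
            if_neg (fun hc => hm (eq_of_beq hc.2)), add_zero, add_zero]

theorem count_len (h : List String) : (count_cards h).length = 14 := by
  unfold count_cards
  rw [show List.range 3 = [0, 1, 2] from rfl]
  simp only [List.foldl_cons, List.foldl_nil, fold_len]
  rfl

theorem counts_eq (a b c : String) (t : List String) :
    count_cards (a :: b :: c :: t)
      = countsOf (pvCharVal (pvFirst a)) (pvCharVal (pvFirst b)) (pvCharVal (pvFirst c)) := by
  have hl : (count_cards (a :: b :: c :: t)).length = 14 := count_len _
  apply List.ext_getElem (by simp [hl, countsOf])
  intro k hk1 hk2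
  have hk : k < 14 := by omega
  have hmem : k ∈ List.range 14 := List.mem_range.mpr hk
  rw [← List.getD_eq_getElem _ 0 hk1]
  unfold count_cards
  rw [show List.range 3 = [0, 1, 2] from rfl]
  simp only [List.foldl_cons, List.foldl_nil]
  rw [show ((a :: b :: c :: t).getD 0 "") = a from rfl,
      show ((a :: b :: c :: t).getD 1 "") = b from rfl,
      show ((a :: b :: c :: t).getD 2 "") = c from rfl]
  rw [fold_getD _ _ (List.nodup_range) _ k
        (by rw [fold_len, fold_len]; simpa using hk),
      fold_getD _ _ (List.nodup_range) _ k (by rw [fold_len]; simpa using hk),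
      fold_getD _ _ (List.nodup_range) _ k (by simpa using hk)]
  rw [show ([0, 0, 0, 0, 0, 0, 0, 0, 0, 0, 0, 0, 0, 0] : List Int) = List.replicate 14 0 from rfl,
      List.getD_eq_getElem _ _ (by simpa using hk), List.getElem_replicate]
  rw [card_match _ _ hk, card_match _ _ hk, card_match _ _ hk]
  simp only [countsOf, List.getElem_map, List.getElem_range, hmem, true_and, pvInd,
    decide_eq_true_eq]
  omega

theorem vals_eq (a b c : String) (t : List String) :
    pvVals (a :: b :: c :: t)
      = valsOf (pvCharVal (pvFirst a)) (pvCharVal (pvFirst b)) (pvCharVal (pvFirst c)) := by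
  unfold pvVals valsOf pvCharVal
  rw [show (3 : Int) = ((3 : Nat) : Int) from rfl, PySem.List.slice_to_natCast]
  rfl

theorem flush_eq (h : List String) :
    is_flush h = ((pvSecond (h.getD 0 "") == pvSecond (h.getD 1 ""))
      && (pvSecond (h.getD 1 "") == pvSecond (h.getD 2 ""))) := by
  simp [is_flush, show List.range 2 = [0, 1] from rfl]

theorem rankA_eq (h : List String) : get_rank h = pvRankA' (is_flush h) (count_cards h) := by
  simp [get_rank, pvRankA', is_straight_flush]

theorem rankB_eq (h : List String) (vals : List Int) :
    pvRankB h vals = pvRankB' (is_flush h) vals := by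
  rw [pvRankB, pvRankB', flush_eq]

def pvS (v0 v1 v2 : Int) : Prop :=
  (∀ fl : Bool, pvRankA' fl (countsOf v0 v1 v2) = pvRankB' fl (valsOf v0 v1 v2))
    ∧ pvTie (valsOf v0 v1 v2) = pvE (countsOf v0 v1 v2)

theorem countsOf_swap01 (v0 v1 v2 : Int) : countsOf v1 v0 v2 = countsOf v0 v1 v2 := by
  simp only [countsOf]
  apply List.map_congr_left
  intro j _
  ring

theorem countsOf_swap12 (v0 v1 v2 : Int) : countsOf v0 v2 v1 = countsOf v0 v1 v2 := by
  simp only [countsOf]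
  apply List.map_congr_left
  intro j _
  ring

theorem valsOf_swap01 (v0 v1 v2 : Int) : valsOf v1 v0 v2 = valsOf v0 v1 v2 := by
  exact PySem.List.sorted_eq_sorted_of_perm _ _ _ (fun a b h => h)
    (List.Perm.filter _ (List.Perm.swap _ _ _))

theorem valsOf_swap12 (v0 v1 v2 : Int) : valsOf v0 v2 v1 = valsOf v0 v1 v2 := by
  exact PySem.List.sorted_eq_sorted_of_perm _ _ _ (fun a b h => h)
    (List.Perm.filter _ (List.Perm.cons _ (List.Perm.swap _ _ _)))

theorem pvS_swap01 (v0 v1 v2 : Int) : pvS v1 v0 v2 = pvS v0 v1 v2 := by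
  unfold pvS
  rw [countsOf_swap01, valsOf_swap01]

theorem pvS_swap12 (v0 v1 v2 : Int) : pvS v0 v2 v1 = pvS v0 v1 v2 := by
  unfold pvS
  rw [countsOf_swap12, valsOf_swap12]

set_option maxHeartbeats 10000000 in
set_option maxRecDepth 4096 in
theorem abstract_sorted : (pvVs.all fun v0 => (pvVs.filter (fun v => decide (v0 ≤ v))).all fun v1 =>
    ((pvVs.filter (fun v => decide (v1 ≤ v))).all fun v2 =>
    (pvRankA' true (countsOf v0 v1 v2) == pvRankB' true (valsOf v0 v1 v2)) &&
    (pvRankA' false (countsOf v0 v1 v2) == pvRankB' false (valsOf v0 v1 v2)) &&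
    (pvTie (valsOf v0 v1 v2) == pvE (countsOf v0 v1 v2)))) = true := by
  decide

theorem pvS_sorted (v0 v1 v2 : Int) (h0 : v0 ∈ pvVs) (h1 : v1 ∈ pvVs) (h2 : v2 ∈ pvVs)
    (h01 : v0 ≤ v1) (h12 : v1 ≤ v2) : pvS v0 v1 v2 := by
  have h := abstract_sorted
  rw [List.all_eq_true] at h
  have h := h v0 h0
  rw [List.all_eq_true] at h
  have h := h v1 (List.mem_filter.mpr ⟨h1, by simpa using h01⟩)
  rw [List.all_eq_true] at h
  have h := h v2 (List.mem_filter.mpr ⟨h2, by simpa using h12⟩)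
  simp only [Bool.and_eq_true, beq_iff_eq] at h
  exact ⟨fun fl => by cases fl <;> [exact h.1.2; exact h.1.1], h.2⟩

theorem pvS_all (v0 v1 v2 : Int) (h0 : v0 ∈ pvVs) (h1 : v1 ∈ pvVs) (h2 : v2 ∈ pvVs) :
    pvS v0 v1 v2 := by
  rcases le_total v0 v1 with a01 | a10
  · rcases le_total v1 v2 with a12 | a21
    · exact pvS_sorted v0 v1 v2 h0 h1 h2 a01 a12
    · rcases le_total v0 v2 with a02 | a20
      · rw [← pvS_swap12]
        exact pvS_sorted v0 v2 v1 h0 h2 h1 a02 a21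
      · rw [← pvS_swap12, ← pvS_swap01]
        exact pvS_sorted v2 v0 v1 h2 h0 h1 a20 a01
  · rcases le_total v0 v2 with a02 | a20
    · rw [← pvS_swap01]
      exact pvS_sorted v1 v0 v2 h1 h0 h2 a10 a02
    · rcases le_total v1 v2 with a12 | a21
      · rw [← pvS_swap01, ← pvS_swap12]
        exact pvS_sorted v1 v2 v0 h1 h2 h0 a12 a20
      · rw [← pvS_swap01, ← pvS_swap12, ← pvS_swap01]
        exact pvS_sorted v2 v1 v0 h2 h1 h0 a21 a10

theorem counts_nonneg (v0 v1 v2 : Int) (i : Nat) : 0 ≤ (countsOf v0 v1 v2).getD i 0 := by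
  by_cases hi : i < 14
  · rw [countsOf, List.getD_eq_getElem _ _ (by simpa using hi)]
    simp only [List.getElem_map, List.getElem_range]
    unfold pvInd
    split_ifs <;> norm_num
  · rw [List.getD_eq_default _ _ (by simpa using hi)]

theorem pyGtRep (a : Nat) : ∀ (b : Nat) (v : Int) (xs ys : List Int),
    (∀ x ∈ xs, x < v) → (∀ y ∈ ys, y < v) →
    pyListGt (List.replicate a v ++ xs) (List.replicate b v ++ ys)
      = (if b < a then true else if a < b then false else pyListGt xs ys) := by
  induction a with
  | zero =>
      intro b v xs ys hx hy
      cases b with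
      | zero => simp
      | succ b =>
          simp only [List.replicate_succ, List.replicate_zero, List.nil_append, List.cons_append]
          cases xs with
          | nil => simp [pyListGt]
          | cons x xs' =>
              have := hx x (by simp)
              simp [pyListGt, this, not_lt.mpr this.le]
  | succ a ih =>
      intro b v xs ys hx hy
      cases b with
      | zero =>
          simp only [List.replicate_succ, List.replicate_zero, List.nil_append, List.cons_append]
          cases ys with
          | nil => simp [pyListGt]
          | cons y ys' =>
              have := hy y (by simp)
              simp [pyListGt, this]
      | succ b =>
          simp only [List.replicate_succ, List.cons_append, pyListGt, lt_irrefl, if_false]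
          rw [ih b v xs ys hx hy]
          simp

theorem mem_pvE' (idxs : List Nat) (cnt : List Int) (x : Int) (hx : x ∈ pvE' idxs cnt) :
    ∃ i ∈ idxs, x = (i : Int) := by
  unfold pvE' at hx
  rw [List.mem_flatMap] at hx
  obtain ⟨i, hi, hxi⟩ := hx
  exact ⟨i, hi, (List.eq_of_mem_replicate hxi)⟩

theorem tiebreak_expand (idxs : List Nat) (c1 c2 : List Int)
    (hp : idxs.Pairwise (· > ·))
    (h1 : ∀ i, 0 ≤ c1.getD i 0) (h2 : ∀ i, 0 ≤ c2.getD i 0) :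
    pvTiebreak c1 c2 idxs
      = (if pyListGt (pvE' idxs c1) (pvE' idxs c2) then 0
         else if pyListGt (pvE' idxs c2) (pvE' idxs c1) then 2 else 1) := by
  induction idxs with
  | nil => simp [pvTiebreak, pvE', pyListGt]
  | cons i rest ih =>
      have hrest : ∀ j ∈ rest, j < i := fun j hj => (List.pairwise_cons.mp hp).1 j hj
      have hb1 : ∀ x ∈ pvE' rest c1, x < (i : Int) := by
        intro x hx
        obtain ⟨j, hj, rfl⟩ := mem_pvE' rest c1 x hx
        exact_mod_cast hrest j hj
      have hb2 : ∀ x ∈ pvE' rest c2, x < (i : Int) := by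
        intro x hx
        obtain ⟨j, hj, rfl⟩ := mem_pvE' rest c2 x hx
        exact_mod_cast hrest j hj
      have he : ∀ c : List Int, pvE' (i :: rest) c
          = List.replicate (c.getD i 0).toNat (i : Int) ++ pvE' rest c := by
        intro c; simp [pvE']
      rw [pvTiebreak, he, he, pyGtRep _ _ _ _ _ hb1 hb2, pyGtRep _ _ _ _ _ hb2 hb1,
          ih (List.Pairwise.of_cons hp)]
      have g1 := h1 i
      have g2 := h2 i
      rcases lt_trichotomy (c1.getD i 0) (c2.getD i 0) with hlt | heq | hgt
      · rw [if_neg (show ¬(c1.getD i 0 > c2.getD i 0) by omega), if_pos hlt,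
            if_neg (show ¬((c2.getD i 0).toNat < (c1.getD i 0).toNat) by omega),
            if_pos (show (c1.getD i 0).toNat < (c2.getD i 0).toNat by omega),
            if_pos (show (c1.getD i 0).toNat < (c2.getD i 0).toNat by omega)]
        simp
      · rw [if_neg (show ¬(c1.getD i 0 > c2.getD i 0) by omega),
            if_neg (show ¬(c1.getD i 0 < c2.getD i 0) by omega),
            if_neg (show ¬((c2.getD i 0).toNat < (c1.getD i 0).toNat) by omega),
            if_neg (show ¬((c1.getD i 0).toNat < (c2.getD i 0).toNat) by omega),
            if_neg (show ¬((c1.getD i 0).toNat < (c2.getD i 0).toNat) by omega),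
            if_neg (show ¬((c2.getD i 0).toNat < (c1.getD i 0).toNat) by omega)]
      · rw [if_pos (show c1.getD i 0 > c2.getD i 0 from hgt),
            if_pos (show (c2.getD i 0).toNat < (c1.getD i 0).toNat by omega),
            if_neg (show ¬((c1.getD i 0).toNat < (c2.getD i 0).toNat) by omega),
            if_pos (show (c2.getD i 0).toNat < (c1.getD i 0).toNat by omega)]
        simp

theorem main_eq (h1 h2 : List String) (hp : Pre_get_winning_hand h1 h2) :
    get_winning_hand h1 h2 = get_winning_hand_alt h1 h2 := by
  obtain ⟨hp1, hp2⟩ := hp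
  obtain ⟨a1, b1, c1, t1, rfl⟩ : ∃ a b c t, h1 = a :: b :: c :: t := by
    rcases h1 with _ | ⟨a, _ | ⟨b, _ | ⟨c, t⟩⟩⟩
    · exact absurd hp1.1 (by simp)
    · exact absurd hp1.1 (by simp)
    · exact absurd hp1.1 (by simp)
    · exact ⟨_, _, _, _, rfl⟩
  obtain ⟨a2, b2, c2, t2, rfl⟩ : ∃ a b c t, h2 = a :: b :: c :: t := by
    rcases h2 with _ | ⟨a, _ | ⟨b, _ | ⟨c, t⟩⟩⟩
    · exact absurd hp2.1 (by simp)
    · exact absurd hp2.1 (by simp)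
    · exact absurd hp2.1 (by simp)
    · exact ⟨_, _, _, _, rfl⟩
  have ab1 := pvS_all _ _ _ (charVal_mem (pvFirst a1)) (charVal_mem (pvFirst b1))
    (charVal_mem (pvFirst c1))
  have ab2 := pvS_all _ _ _ (charVal_mem (pvFirst a2)) (charVal_mem (pvFirst b2))
    (charVal_mem (pvFirst c2))
  unfold pvS at ab1 ab2
  have hc1 := counts_eq a1 b1 c1 t1
  have hc2 := counts_eq a2 b2 c2 t2
  have hr1 : pvRankB (a1 :: b1 :: c1 :: t1) (pvVals (a1 :: b1 :: c1 :: t1))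
      = get_rank (a1 :: b1 :: c1 :: t1) := by
    rw [rankA_eq, rankB_eq, hc1, vals_eq, ab1.1]
  have hr2 : pvRankB (a2 :: b2 :: c2 :: t2) (pvVals (a2 :: b2 :: c2 :: t2))
      = get_rank (a2 :: b2 :: c2 :: t2) := by
    rw [rankA_eq, rankB_eq, hc2, vals_eq, ab2.1]
  have ht1 : pvTie (pvVals (a1 :: b1 :: c1 :: t1)) = pvE (count_cards (a1 :: b1 :: c1 :: t1)) := by
    rw [vals_eq, hc1, ab1.2]
  have ht2 : pvTie (pvVals (a2 :: b2 :: c2 :: t2)) = pvE (count_cards (a2 :: b2 :: c2 :: t2)) := by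
    rw [vals_eq, hc2, ab2.2]
  rw [get_winning_hand, get_winning_hand_alt]
  simp only [pyPairGt, hr1, hr2, ht1, ht2]
  have hdesc : ((List.range 14).reverse).Pairwise (fun x y => x > y) := by decide
  have htb := tiebreak_expand ((List.range 14).reverse)
      (count_cards (a1 :: b1 :: c1 :: t1)) (count_cards (a2 :: b2 :: c2 :: t2)) hdesc
      (fun i => by rw [hc1]; exact counts_nonneg _ _ _ i)
      (fun i => by rw [hc2]; exact counts_nonneg _ _ _ i)
  rcases lt_trichotomy (get_rank (a1 :: b1 :: c1 :: t1)) (get_rank (a2 :: b2 :: c2 :: t2))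
    with hlt | heq | hgt
  · rw [if_neg (show ¬(get_rank (a1 :: b1 :: c1 :: t1) > get_rank (a2 :: b2 :: c2 :: t2)) by omega),
        if_pos (show get_rank (a2 :: b2 :: c2 :: t2) > get_rank (a1 :: b1 :: c1 :: t1) from hlt),
        if_neg (show ¬(get_rank (a1 :: b1 :: c1 :: t1) > get_rank (a2 :: b2 :: c2 :: t2)) by omega),
        if_pos (show get_rank (a1 :: b1 :: c1 :: t1) < get_rank (a2 :: b2 :: c2 :: t2) from hlt)]
    simp <;> exact fun h => absurd h (not_le.mpr hlt)
  · rw [if_neg (show ¬(get_rank (a1 :: b1 :: c1 :: t1) > get_rank (a2 :: b2 :: c2 :: t2)) by omega),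
        if_neg (show ¬(get_rank (a2 :: b2 :: c2 :: t2) > get_rank (a1 :: b1 :: c1 :: t1)) by omega),
        if_pos (show get_rank (a2 :: b2 :: c2 :: t2) = get_rank (a1 :: b1 :: c1 :: t1) from heq.symm),
        if_neg (show ¬(get_rank (a1 :: b1 :: c1 :: t1) > get_rank (a2 :: b2 :: c2 :: t2)) by omega),
        if_neg (show ¬(get_rank (a1 :: b1 :: c1 :: t1) < get_rank (a2 :: b2 :: c2 :: t2)) by omega),
        if_neg (show ¬(get_rank (a2 :: b2 :: c2 :: t2) > get_rank (a1 :: b1 :: c1 :: t1)) by omega),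
        if_neg (show ¬(get_rank (a2 :: b2 :: c2 :: t2) < get_rank (a1 :: b1 :: c1 :: t1)) by omega),
        htb]
    rfl
  · rw [if_pos (show get_rank (a1 :: b1 :: c1 :: t1) > get_rank (a2 :: b2 :: c2 :: t2) from hgt),
        if_pos (show get_rank (a1 :: b1 :: c1 :: t1) > get_rank (a2 :: b2 :: c2 :: t2) from hgt)]
    simp

-- ===== VERDICT (by name: the statement is the Claim_ definition above) =====
theorem get_winning_hand_spec : Claim_equal_get_winning_hand := by
  intro h1 h2 _ hp
  unfold Spec_get_winning_hand
  exact main_eq h1 h2 hp
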